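-- pv_equiv track=rewrite | github.com/Tuizter/alien-rouletteTM-app | app.py | filtrar_alvos_por_limite
-- ===== SOURCE A (Python) =====
-- from itertools import groupby
--
-- def filtrar_alvos_por_limite(alvos_ordenados, limite=5):
--     if not alvos_ordenados: return []
--     alvos_finais = []
--     grupos_por_score = [list(g) for k, g in groupby(alvos_ordenados, key=lambda x: x[1])]
--     for grupo in grupos_por_score:
--         if len(alvos_finais) + len(grupo) <= limite: alvos_finais.extend(grupo)
--         else: break
--     return alvos_finais
-- ===== SOURCE B (Python) =====
-- def filtrar_alvos_por_limite(alvos_ordenados, limite=5):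
--     def take(rest, usado):
--         if not rest:
--             return []
--         score = rest[0][1]
--         j = 0
--         while j < len(rest) and rest[j][1] == score:
--             j += 1
--         if usado + j > limite:
--             return []
--         return rest[:j] + take(rest[j:], usado + j)
--     return take(alvos_ordenados, 0)
-- ===== Notes on version B (the rewrite author's own statement) =====
-- stated objective: alternative
-- what changed: Replaces itertools.groupby materialisation of all score-groups plus a break-loop by a direct recursion that peels one leading score-run at a time and stops as soon as a run does not fit the limit.
import Mathlib
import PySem

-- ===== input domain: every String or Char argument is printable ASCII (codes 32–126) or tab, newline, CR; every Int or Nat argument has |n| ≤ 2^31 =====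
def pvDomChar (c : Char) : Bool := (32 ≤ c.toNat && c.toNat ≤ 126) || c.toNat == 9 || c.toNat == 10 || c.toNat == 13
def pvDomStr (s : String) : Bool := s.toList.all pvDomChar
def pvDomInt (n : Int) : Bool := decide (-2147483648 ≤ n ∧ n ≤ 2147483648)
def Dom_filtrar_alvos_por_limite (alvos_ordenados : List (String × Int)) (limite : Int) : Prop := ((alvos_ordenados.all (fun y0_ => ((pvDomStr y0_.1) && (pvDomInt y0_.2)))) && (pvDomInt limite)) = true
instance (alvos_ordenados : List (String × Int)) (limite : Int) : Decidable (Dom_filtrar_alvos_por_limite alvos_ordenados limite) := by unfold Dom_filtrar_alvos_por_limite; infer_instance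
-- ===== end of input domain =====

-- B replaces A's groupby-materialisation + break-fold by a direct recursion that peels one
-- score-run at a time and stops as soon as a run does not fit (objective: alternative decomposition).

-- ===== PORT A =====
-- itertools.groupby(xs, key=lambda x: x[1]) with each group materialised as a list
def pyGroupBy : List (String × Int) → List (List (String × Int))
  | [] => []
  | x :: xs =>
      (x :: xs.takeWhile (fun y => y.2 == x.2)) :: pyGroupBy (xs.dropWhile (fun y => y.2 == x.2))
termination_by xs => xs.length
decreasing_by
  simp only [List.length_cons]
  have := List.length_dropWhile_le (fun y => y.2 == x.2) xs
  omega

def filtrar_alvos_por_limite (alvos_ordenados : List (String × Int)) (limite : Int) : List (String × Int) :=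
  if alvos_ordenados = [] then []
  else
    ((pyGroupBy alvos_ordenados).foldl
      (fun (st : List (String × Int) × Bool) grupo =>
        if st.2 then st
        else if ((st.1.length : Int) + (grupo.length : Int)) ≤ limite then (st.1 ++ grupo, false)
        else (st.1, true))
      ([], false)).1

-- ===== PORT B =====
-- j-counter of B's while loop: length of the leading run with the given score
def pvRunLen (score : Int) : List (String × Int) → Int
  | [] => 0
  | y :: ys => if y.2 == score then 1 + pvRunLen score ys else 0

theorem pvRunLen_eq (score : Int) (xs : List (String × Int)) :
    pvRunLen score xs = ((xs.takeWhile (fun y => y.2 == score)).length : Int) := by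
  induction xs with
  | nil => simp [pvRunLen]
  | cons y ys ih =>
      by_cases h : y.2 == score <;> simp [pvRunLen, List.takeWhile, h, ih]
      omega

theorem pvTake_dec (x : String × Int) (xs : List (String × Int)) :
    (PySem.List.slice (x :: xs) (some (pvRunLen x.2 (x :: xs))) none).length < (x :: xs).length := by
  rw [pvRunLen_eq, PySem.List.slice_from_natCast]
  simp only [List.length_drop, List.length_cons, List.takeWhile]
  simp only [beq_self_eq_true, List.length_cons]
  omega

def pvTake (limite : Int) : List (String × Int) → Int → List (String × Int)
  | [], _ => []
  | x :: xs, usado =>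
      let j := pvRunLen x.2 (x :: xs)
      if limite < usado + j then []
      else PySem.List.slice (x :: xs) none (some j)
            ++ pvTake limite (PySem.List.slice (x :: xs) (some j) none) (usado + j)
termination_by rest _ => rest.length
decreasing_by exact pvTake_dec x xs

def filtrar_alvos_por_limite_alt (alvos_ordenados : List (String × Int)) (limite : Int) : List (String × Int) :=
  pvTake limite alvos_ordenados 0

-- ===== PRECONDITION & SPEC =====
def Spec_filtrar_alvos_por_limite (alvos_ordenados : List (String × Int)) (limite : Int) (out : List (String × Int)) : Prop := out = filtrar_alvos_por_limite_alt alvos_ordenados limite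
instance (alvos_ordenados : List (String × Int)) (limite : Int) (out : List (String × Int)) : Decidable (Spec_filtrar_alvos_por_limite alvos_ordenados limite out) := by unfold Spec_filtrar_alvos_por_limite; infer_instance

-- ===== CLAIM (what is proved, stated in full; the proofs are below) =====
def Claim_equal_filtrar_alvos_por_limite : Prop := ∀ (alvos_ordenados : List (String × Int)) (limite : Int), Dom_filtrar_alvos_por_limite alvos_ordenados limite → Spec_filtrar_alvos_por_limite alvos_ordenados limite (filtrar_alvos_por_limite alvos_ordenados limite)

-- ===== LEMMAS AND PROOFS =====

-- once the break flag is set, A's fold never changes the state again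
theorem foldl_broken (limite : Int) (gs : List (List (String × Int))) (st : List (String × Int)) :
    (gs.foldl
      (fun (st : List (String × Int) × Bool) grupo =>
        if st.2 then st
        else if ((st.1.length : Int) + (grupo.length : Int)) ≤ limite then (st.1 ++ grupo, false)
        else (st.1, true))
      (st, true)) = (st, true) := by
  induction gs with
  | nil => rfl
  | cons g gs ih => simpa using ih

theorem take_tw {α : Type} (p : α → Bool) (xs : List α) :
    xs.take (xs.takeWhile p).length = xs.takeWhile p := by
  induction xs with
  | nil => rfl
  | cons y ys ih => by_cases h : p y <;> simp [List.takeWhile, h, ih]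

theorem drop_tw {α : Type} (p : α → Bool) (xs : List α) :
    xs.drop (xs.takeWhile p).length = xs.dropWhile p := by
  induction xs with
  | nil => rfl
  | cons y ys ih => by_cases h : p y <;> simp [List.takeWhile, List.dropWhile, h, ih]

theorem slice_to_run (x : String × Int) (xs : List (String × Int)) :
    PySem.List.slice (x :: xs) none (some (pvRunLen x.2 (x :: xs)))
      = x :: xs.takeWhile (fun y => y.2 == x.2) := by
  have hj : pvRunLen x.2 (x :: xs)
      = (((x :: xs.takeWhile (fun y => y.2 == x.2)).length : Nat) : Int) := by
    simp [pvRunLen, pvRunLen_eq]; omega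
  rw [hj, PySem.List.slice_to_natCast]
  simp [take_tw]

theorem slice_from_run (x : String × Int) (xs : List (String × Int)) :
    PySem.List.slice (x :: xs) (some (pvRunLen x.2 (x :: xs))) none
      = xs.dropWhile (fun y => y.2 == x.2) := by
  have hj : pvRunLen x.2 (x :: xs)
      = (((x :: xs.takeWhile (fun y => y.2 == x.2)).length : Nat) : Int) := by
    simp [pvRunLen, pvRunLen_eq]; omega
  rw [hj, PySem.List.slice_from_natCast]
  simp [drop_tw]

theorem main_lemma (limite : Int) :
    ∀ (rest acc : List (String × Int)),
      ((pyGroupBy rest).foldl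
        (fun (st : List (String × Int) × Bool) grupo =>
          if st.2 then st
          else if ((st.1.length : Int) + (grupo.length : Int)) ≤ limite then (st.1 ++ grupo, false)
          else (st.1, true))
        (acc, false)).1 = acc ++ pvTake limite rest (acc.length) := by
  intro rest
  induction rest using pyGroupBy.induct with
  | case1 => intro acc; simp [pyGroupBy, pvTake]
  | case2 x xs ih =>
      intro acc
      rw [pyGroupBy, pvTake]
      simp only [List.foldl_cons, Bool.false_eq_true, if_false, slice_to_run, slice_from_run]
      have hj : pvRunLen x.2 (x :: xs)
          = (((x :: xs.takeWhile (fun y => y.2 == x.2)).length : Nat) : Int) := by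
        simp [pvRunLen, pvRunLen_eq]; omega
      by_cases hfit : ((acc.length : Int) + ((x :: xs.takeWhile (fun y => y.2 == x.2)).length : Int)) ≤ limite
      · have hnot : ¬ limite < (acc.length : Int) + pvRunLen x.2 (x :: xs) := by
          rw [hj]; omega
        rw [if_pos hfit, if_neg hnot]
        rw [ih (acc ++ (x :: xs.takeWhile (fun y => y.2 == x.2)))]
        have hlen : (((acc ++ (x :: xs.takeWhile (fun y => y.2 == x.2))).length : Nat) : Int)
            = (acc.length : Int) + pvRunLen x.2 (x :: xs) := by
          rw [hj]; push_cast [List.length_append]; ring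
        rw [hlen, List.append_assoc]
      · have hlt : limite < (acc.length : Int) + pvRunLen x.2 (x :: xs) := by
          rw [hj]; omega
        rw [if_neg hfit, if_pos hlt]
        rw [foldl_broken]
        simp

-- ===== VERDICT (by name: the statement is the Claim_ definition above) =====
theorem filtrar_alvos_por_limite_spec : Claim_equal_filtrar_alvos_por_limite := by
  intro alvos limite _
  unfold Spec_filtrar_alvos_por_limite filtrar_alvos_por_limite filtrar_alvos_por_limite_alt
  by_cases h : alvos = []
  · subst h; simp [pvTake]
  · simpa [h] using main_lemma limite alvos []
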